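-- pv_equiv track=rewrite | github.com/vergaracarlos/CodeSamples | Python/Assignment 2.py | doubleDigitValue
-- ===== SOURCE A (Python) =====
-- def doubleDigitValue(number):
--   number = number * 2
--   if number < 10:
--     return number
--   else:
--     numString = str(number)
--     sum = 0
--     for i in range(0, len(numString)):
--         sum += int(numString[i])
--     return sum
-- ===== SOURCE B (Python) =====
-- def doubleDigitValue(number):
--   number = number * 2
--   if number < 10:
--     return number
--   total = 0
--   while number > 0:
--     total += number % 10
--     number //= 10
--   return total
-- ===== Notes on version B (the rewrite author's own statement) =====
-- stated objective: idiomatic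
-- what changed: Replaced the str()-conversion plus indexed character loop with an arithmetic digit-peeling loop (total += n % 10; n //= 10), changing both the traversal and the data representation.
import Mathlib
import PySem

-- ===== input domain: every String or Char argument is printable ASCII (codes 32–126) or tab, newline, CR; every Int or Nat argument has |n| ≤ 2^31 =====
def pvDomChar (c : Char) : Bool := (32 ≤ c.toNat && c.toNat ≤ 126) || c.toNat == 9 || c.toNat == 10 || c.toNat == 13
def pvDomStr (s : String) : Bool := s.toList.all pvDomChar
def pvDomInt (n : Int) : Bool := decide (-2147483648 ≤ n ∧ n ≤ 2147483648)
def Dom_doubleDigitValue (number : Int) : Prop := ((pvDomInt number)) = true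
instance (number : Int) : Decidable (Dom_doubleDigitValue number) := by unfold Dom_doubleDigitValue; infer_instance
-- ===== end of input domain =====

-- B replaces A's string-conversion digit loop by an arithmetic digit-peeling loop (idiomatic; return value proved equal on all Int inputs).

-- ===== PORT A =====
-- str(number) is kept on the List Char side (PySem.Int.toChars); int(numString[i]) is
-- PySem.Int.ofChars? of the single accessed char — its `.getD 0` default is never used on the
-- inputs that reach the loop (every accessed char is a decimal digit of a nonnegative number).
def doubleDigitValue (number : Int) : Int :=
  let n := number * 2
  if n < 10 then n
  else
    let numString := PySem.Int.toChars n
    (PySem.List.pyRange 0 (PySem.List.len numString) 1).foldl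
      (fun sum i => sum + (PySem.Int.ofChars? [PySem.List.pyGetD numString i '0']).getD 0) 0

-- ===== PORT B =====
-- the while loop of Source B: while number > 0: total += number % 10; number //= 10
def doubleDigitValueLoop (number total : Int) : Int :=
  if 0 < number then
    doubleDigitValueLoop (PySem.Int.floordiv number 10) (total + PySem.Int.mod number 10)
  else total
termination_by number.toNat
decreasing_by
  rw [PySem.Int.floordiv_eq_ediv_of_pos (by omega : (0:Int) < 10)]
  omega

def doubleDigitValue_alt (number : Int) : Int :=
  let n := number * 2
  if n < 10 then n
  else doubleDigitValueLoop n 0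

-- ===== PRECONDITION & SPEC =====
def Spec_doubleDigitValue (number : Int) (out : Int) : Prop := out = doubleDigitValue_alt number
instance (number : Int) (out : Int) : Decidable (Spec_doubleDigitValue number out) := by unfold Spec_doubleDigitValue; infer_instance

-- ===== CLAIM (what is proved, stated in full; the proofs are below) =====
def Claim_equal_doubleDigitValue : Prop := ∀ (number : Int), Dom_doubleDigitValue number → Spec_doubleDigitValue number (doubleDigitValue number)

-- ===== LEMMAS AND PROOFS =====

-- the common mathematical value: decimal digit sum of a natural number
def pvNatDigitSum (m : Nat) : Int :=
  if m = 0 then 0 else ((m % 10 : Nat) : Int) + pvNatDigitSum (m / 10)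

-- value Python's int() gives to a single decimal digit char
def pvCharVal (c : Char) : Int := (PySem.Int.ofChars? [c]).getD 0

theorem pvCharVal_digitChar (r : Nat) (h : r < 10) : pvCharVal (Nat.digitChar r) = (r : Int) := by
  interval_cases r <;> decide

theorem toDigitsCore_sum (f : Nat) : ∀ (n : Nat) (l : List Char), n < f →
    ((Nat.toDigitsCore 10 f n l).map pvCharVal).sum = pvNatDigitSum n + (l.map pvCharVal).sum := by
  induction f with
  | zero => intro n l h; omega
  | succ f ih =>
    intro n l h
    simp only [Nat.toDigitsCore]
    by_cases h0 : n / 10 = 0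
    · rw [if_pos h0]
      simp only [List.map_cons, List.sum_cons]
      rw [pvCharVal_digitChar _ (Nat.mod_lt _ (by omega))]
      by_cases hn : n = 0
      · subst hn; simp [pvNatDigitSum]
      · conv_rhs => rw [pvNatDigitSum, if_neg hn, h0, pvNatDigitSum, if_pos rfl]
        ring
    · rw [if_neg h0, ih _ _ (by omega)]
      simp only [List.map_cons, List.sum_cons]
      rw [pvCharVal_digitChar _ (Nat.mod_lt _ (by omega))]
      conv_rhs => rw [pvNatDigitSum, if_neg (by omega : ¬ n = 0)]
      ring

theorem loop_eq_digitSum (k : Nat) : ∀ (n total : Int), n.toNat = k →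
    doubleDigitValueLoop n total = total + pvNatDigitSum n.toNat := by
  induction k using Nat.strong_induction_on with
  | _ k ih =>
    intro n total hk
    rw [doubleDigitValueLoop]
    by_cases h : 0 < n
    · rw [if_pos h]
      rw [PySem.Int.floordiv_eq_ediv_of_pos (by omega : (0:Int) < 10),
          PySem.Int.mod_eq_emod_of_pos (by omega : (0:Int) < 10)]
      rw [ih (n / 10).toNat (by omega) _ _ rfl]
      conv_rhs => rw [pvNatDigitSum, if_neg (show ¬ n.toNat = 0 by omega)]
      have h1 : ((n.toNat % 10 : Nat) : Int) = n % 10 := by omega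
      have h2 : (n / 10).toNat = n.toNat / 10 := by omega
      rw [h1, h2]; ring
    · rw [if_neg h, pvNatDigitSum, if_pos (by omega)]
      ring

-- ===== VERDICT (by name: the statement is the Claim_ definition above) =====
theorem doubleDigitValue_spec : Claim_equal_doubleDigitValue := by
  intro number _
  unfold Spec_doubleDigitValue doubleDigitValue doubleDigitValue_alt
  simp only []
  set n := number * 2 with hn
  by_cases h : n < 10
  · simp [h]
  · rw [if_neg h, if_neg h]
    have h0 : ¬ n < 0 := by omega
    have hchars : PySem.Int.toChars n = Nat.toDigitsCore 10 (n.toNat + 1) n.toNat [] := by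
      rw [PySem.Int.toChars, if_neg h0, Nat.toDigits]
    rw [hchars]
    rw [show PySem.List.len (Nat.toDigitsCore 10 (n.toNat + 1) n.toNat []) =
        ((Nat.toDigitsCore 10 (n.toNat + 1) n.toNat []).length : Int) from PySem.List.len_eq _]
    rw [PySem.List.foldl_pyRange_zero_pyGetD' (Nat.toDigitsCore 10 (n.toNat + 1) n.toNat []) '0'
        (fun sum c => sum + (PySem.Int.ofChars? [c]).getD 0) 0]
    rw [PySem.List.foldl_add]
    have := toDigitsCore_sum (n.toNat + 1) n.toNat [] (by omega)
    simp only [List.map_nil, List.sum_nil, add_zero] at this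
    rw [show (fun c => (PySem.Int.ofChars? [c]).getD 0) = pvCharVal from rfl, this]
    rw [loop_eq_digitSum n.toNat n 0 rfl]
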